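-- pv_equiv track=rewrite | github.com/jcolinpatrick/kryptos | scripts/e_s_122_berlin_clock_perm.py | lamps_to_permutation
-- ===== SOURCE A (Python) =====
-- def lamps_to_permutation(lamps, length):
--     """Convert lamp pattern to a transposition permutation.
--
--     Strategy: lit positions are read first, then unlit positions.
--     For text longer than 24 lamps, extend pattern cyclically.
--     """
--     n_lamps = len(lamps)
--     lit_positions = []
--     unlit_positions = []
--
--     for i in range(length):
--         lamp_idx = i % n_lamps
--         if lamps[lamp_idx]:
--             lit_positions.append(i)
--         else:
--             unlit_positions.append(i)
--
--     # Permutation: first read all lit positions, then unlit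
--     perm = lit_positions + unlit_positions
--     return perm
-- ===== SOURCE B (Python) =====
-- def lamps_to_permutation(lamps, length):
--     """Lit indices first (in order), then unlit, via one stable sort on the lamp state."""
--     n_lamps = len(lamps)
--     return sorted(range(length), key=lambda i: not lamps[i % n_lamps])
-- ===== Notes on version B (the rewrite author's own statement) =====
-- stated objective: idiomatic
-- what changed: Replaces the explicit two-accumulator partition loop with a single stable sort of range(length) keyed on the (cyclically indexed) lamp state, relying on sort stability for the lit-then-unlit order.
import Mathlib
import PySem

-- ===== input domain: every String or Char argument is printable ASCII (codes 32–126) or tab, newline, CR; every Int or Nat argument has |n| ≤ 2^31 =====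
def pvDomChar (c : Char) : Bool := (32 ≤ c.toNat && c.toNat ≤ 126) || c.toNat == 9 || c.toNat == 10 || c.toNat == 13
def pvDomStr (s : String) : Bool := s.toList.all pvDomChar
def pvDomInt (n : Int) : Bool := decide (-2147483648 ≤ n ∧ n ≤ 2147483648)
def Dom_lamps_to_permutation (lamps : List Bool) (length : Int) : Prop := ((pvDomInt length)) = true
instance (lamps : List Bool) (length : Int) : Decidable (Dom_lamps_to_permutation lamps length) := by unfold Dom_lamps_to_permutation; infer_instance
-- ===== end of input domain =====

-- B replaces A's two-accumulator partition loop with one stable sort keyed on lamp state (idiomatic, not faster).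

-- ===== PORT A =====
-- literal port: loop over range(length), appending i to lit or unlit, then concatenate
def lamps_to_permutation (lamps : List Bool) (length : Int) : List Int :=
  let n_lamps : Int := lamps.length
  let acc :=
    (PySem.List.pyRange 0 length 1).foldl
      (fun (acc : List Int × List Int) i =>
        if (PySem.List.pyGet? lamps (PySem.Int.mod i n_lamps)).getD false
        then (acc.1 ++ [i], acc.2)
        else (acc.1, acc.2 ++ [i]))
      ([], [])
  acc.1 ++ acc.2

-- ===== PORT B =====
-- literal port of Source B: stable sort of range(length) by key i ↦ not lamps[i % n_lamps]
def lamps_to_permutation_alt (lamps : List Bool) (length : Int) : List Int :=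
  let n_lamps : Int := lamps.length
  PySem.List.sorted (PySem.List.pyRange 0 length 1)
    (fun i => !((PySem.List.pyGet? lamps (PySem.Int.mod i n_lamps)).getD false)) false

-- ===== PRECONDITION & SPEC =====
-- Pre_ excludes exactly lamps = [] with length ≥ 1, where Python A (and B) raise ZeroDivisionError on i % 0.
def Pre_lamps_to_permutation (lamps : List Bool) (length : Int) : Prop :=
  lamps ≠ [] ∨ length < 1
instance (lamps : List Bool) (length : Int) : Decidable (Pre_lamps_to_permutation lamps length) := by unfold Pre_lamps_to_permutation; infer_instance

def pvWitness_lamps_to_permutation : List Bool × Int := ([true, false, true], 7)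

def Spec_lamps_to_permutation (lamps : List Bool) (length : Int) (out : List Int) : Prop := out = lamps_to_permutation_alt lamps length
instance (lamps : List Bool) (length : Int) (out : List Int) : Decidable (Spec_lamps_to_permutation lamps length out) := by unfold Spec_lamps_to_permutation; infer_instance

-- ===== CLAIM (what is proved, stated in full; the proofs are below) =====
def Claim_equal_lamps_to_permutation : Prop := ∀ (lamps : List Bool) (length : Int), Dom_lamps_to_permutation lamps length → Pre_lamps_to_permutation lamps length → Spec_lamps_to_permutation lamps length (lamps_to_permutation lamps length)

-- ===== LEMMAS AND PROOFS =====

-- inserting a false-key element into (all-false F) ++ (all-true T) puts it at the end of F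
theorem insertBool_false {α : Type} (key : α → Bool) (x : α) (F T : List α)
    (hx : key x = false) (hF : ∀ y ∈ F, key y = false) (hT : ∀ y ∈ T, key y = true) :
    PySem.List.insertBy (fun a b => decide (key a < key b)) x (F ++ T) = (F ++ [x]) ++ T := by
  induction F with
  | nil =>
    cases T with
    | nil => simp [PySem.List.insertBy]
    | cons y ys =>
      have hy : key y = true := hT y (by simp)
      simp [PySem.List.insertBy, hx, hy]
  | cons f F' ih =>
    have hf : key f = false := hF f (by simp)
    have hF' : ∀ y ∈ F', key y = false := fun y hy => hF y (List.mem_cons_of_mem _ hy)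
    simp only [List.cons_append, PySem.List.insertBy]
    rw [if_neg (by simp [hx, hf]), ih hF']

-- inserting a true-key element goes to the very end
theorem insertBool_true {α : Type} (key : α → Bool) (x : α) (ys : List α)
    (hx : key x = true) :
    PySem.List.insertBy (fun a b => decide (key a < key b)) x ys = ys ++ [x] := by
  apply PySem.List.insertBy_of_forall_not_before
  intro y _
  simp [hx]

-- the insertion-sort fold on a Bool key maintains the false-block/true-block split
theorem foldl_insertBool {α : Type} (key : α → Bool) (xs F T : List α)
    (hF : ∀ y ∈ F, key y = false) (hT : ∀ y ∈ T, key y = true) :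
    xs.foldl (fun acc x => PySem.List.insertBy (fun a b => decide (key a < key b)) x acc) (F ++ T)
      = (F ++ xs.filter (fun x => !(key x))) ++ (T ++ xs.filter key) := by
  induction xs generalizing F T with
  | nil => simp
  | cons x xs ih =>
    cases hx : key x with
    | false =>
      have hF' : ∀ y ∈ F ++ [x], key y = false := by
        intro y hy
        rcases List.mem_append.1 hy with h | h
        · exact hF y h
        · simp at h; subst h; exact hx
      rw [List.foldl_cons, insertBool_false key x F T hx hF hT, ih (F ++ [x]) T hF' hT]
      simp [hx]
    | true =>
      have hT' : ∀ y ∈ T ++ [x], key y = true := by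
        intro y hy
        rcases List.mem_append.1 hy with h | h
        · exact hT y h
        · simp at h; subst h; exact hx
      have hins : PySem.List.insertBy (fun a b => decide (key a < key b)) x (F ++ T)
          = F ++ (T ++ [x]) := by
        rw [insertBool_true key x (F ++ T) hx]; simp
      rw [List.foldl_cons, hins, ih F (T ++ [x]) hF hT']
      simp [hx]

-- a stable sort on a Bool key is exactly "false keys first, true keys second"
theorem sorted_bool_key {α : Type} (key : α → Bool) (xs : List α) :
    PySem.List.sorted xs key false = xs.filter (fun x => !(key x)) ++ xs.filter key := by
  rw [PySem.List.sorted_eq_foldl_insertBy]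
  have := foldl_insertBool key xs [] [] (by simp) (by simp)
  simpa using this

-- A's two-accumulator fold computes the two filters
theorem foldA (c : Int → Bool) (xs : List Int) (L U : List Int) :
    xs.foldl (fun (acc : List Int × List Int) i =>
        if c i then (acc.1 ++ [i], acc.2) else (acc.1, acc.2 ++ [i])) (L, U)
      = (L ++ xs.filter c, U ++ xs.filter (fun i => !(c i))) := by
  induction xs generalizing L U with
  | nil => simp
  | cons x xs ih =>
    cases hx : c x with
    | false => simp [hx, ih]
    | true => simp [hx, ih]

-- ===== VERDICT (by name: the statement is the Claim_ definition above) =====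
theorem lamps_to_permutation_spec : Claim_equal_lamps_to_permutation := by
  intro lamps length _ _
  show lamps_to_permutation lamps length = lamps_to_permutation_alt lamps length
  unfold lamps_to_permutation lamps_to_permutation_alt
  simp only [sorted_bool_key, foldA, Bool.not_not, List.nil_append]
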